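-- pv_equiv track=rewrite | github.com/mnaoumov/mathdoku-ocr-slides-generator | ocr-python/ocr/ocr_mathdoku.py | _can_factor
-- ===== SOURCE A (Python) =====
-- def _can_factor(value: int, k: int, max_digit: int) -> bool:
--     """Check if value can be expressed as product of exactly k digits in [1, max_digit]."""
--     if k == 1:
--         return 1 <= value <= max_digit
--     if value > max_digit ** k:
--         return False
--     for d in range(max_digit, 0, -1):
--         if value % d == 0 and _can_factor(value // d, k - 1, max_digit):
--             return True
--     return False
-- ===== SOURCE B (Python) =====
-- def _can_factor(value: int, k: int, max_digit: int) -> bool: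
--     """Check if value can be expressed as product of exactly k digits in [1, max_digit]."""
--     if k <= 0:
--         return k == 0 and value == 1
--     if value <= 0 or max_digit < 1:
--         return False
--     memo = {}
--
--     def counts(v):
--         # set of m such that v is a product of exactly m digits in [2, max_digit]
--         if v == 1:
--             return {0}
--         if v not in memo:
--             s = set()
--             for d in range(2, max_digit + 1):
--                 if v % d == 0:
--                     s |= {m + 1 for m in counts(v // d)}
--             memo[v] = s
--         return memo[v]
--
--     # pad with (k - m) ones (max_digit >= 1, so 1 is an allowed digit)
--     return any(m <= k for m in counts(value))
-- ===== Notes on version B (the rewrite author's own statement) =====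
-- stated objective: faster
-- what changed: A's exponential digit-by-digit backtracking search is replaced by a memoized DP over the divisors of value that computes the set of possible counts of [2,max_digit]-factors once and then pads with 1s, making the cost independent of k.
-- outside the precondition, e.g. on _can_factor(0, 25, 9): A does not finish within the time limit, B returns False; on _can_factor(-3, 2, 5): A returns False, B returns False; on _can_factor(1, 0, 9): A returns False, B returns True
import Mathlib
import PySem

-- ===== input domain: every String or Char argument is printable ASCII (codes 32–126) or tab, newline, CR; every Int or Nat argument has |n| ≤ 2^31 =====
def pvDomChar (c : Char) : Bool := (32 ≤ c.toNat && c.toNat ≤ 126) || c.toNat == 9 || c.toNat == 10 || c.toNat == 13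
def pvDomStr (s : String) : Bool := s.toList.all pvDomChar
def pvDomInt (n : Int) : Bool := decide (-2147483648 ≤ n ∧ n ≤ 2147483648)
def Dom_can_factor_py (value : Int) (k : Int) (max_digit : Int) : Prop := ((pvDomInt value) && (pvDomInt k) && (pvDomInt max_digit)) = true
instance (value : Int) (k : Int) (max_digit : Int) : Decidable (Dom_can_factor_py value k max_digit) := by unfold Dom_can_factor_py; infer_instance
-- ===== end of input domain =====

-- B replaces A's digit-by-digit backtracking search with a memoized DP over the divisors of
-- value (counting how many [2,max_digit]-factors can produce it, then padding with 1s).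

-- ===== PORT A =====
-- Port of Python's `value > max_digit ** k`.  For 0 ≤ k the power is an exact integer.
-- For k < 0 Python computes the FLOAT max_digit**k = 1/max_digit^|k| (ZeroDivisionError when
-- max_digit = 0 — excluded by Pre_).  That float has magnitude ≤ 1 (exactly ±1.0 when
-- max_digit^|k| = ±1, otherwise of magnitude ≤ 1/2, and rounding keeps it strictly between
-- -1 and 1 with its sign), so comparing the INTEGER `value` against it is decided exactly by
-- the integer p = max_digit^|k| as below (exact on the stated domain).
def pyPowGtA (value : Int) (max_digit : Int) (k : Int) : Bool :=
  if 0 ≤ k then decide (max_digit ^ k.toNat < value)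
  else
    let p : Int := max_digit ^ k.natAbs
    if 2 ≤ p then decide (1 ≤ value)        -- 0 < 1/p ≤ 1/2 : value > it ↔ 1 ≤ value
    else if p = 1 then decide (2 ≤ value)   -- exactly 1.0   : value > it ↔ 2 ≤ value
    else if p ≤ -1 then decide (0 ≤ value)  -- -1 ≤ 1/p < 0  : value > it ↔ 0 ≤ value
    else false                              -- p = 0 : ZeroDivisionError in Python (outside Pre_)

def can_factor_py (value : Int) (k : Int) (max_digit : Int) : Bool :=
  if k = 1 then decide (1 ≤ value ∧ value ≤ max_digit)
  else if pyPowGtA value max_digit k then false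
  else if k ≤ 0 then false  -- totality guard: Python recurses unboundedly here (outside Pre_)
  else (PySem.List.pyRange max_digit 0 (-1)).any (fun d =>
    decide (PySem.Int.mod value d = 0) &&
      can_factor_py (PySem.Int.floordiv value d) (k - 1) max_digit)
termination_by k.toNat
decreasing_by omega

-- ===== PORT B =====
-- Python B's inner `counts(v)`: the set (distinct list) of all m such that v is a product of
-- exactly m digits in [2, max_digit].  The memo table of Source B is dropped (same values are
-- computed); the `if h : … < …` is a totality guard, always true on the reachable calls
-- (v ≥ 2, d ≥ 2, d ∣ v), where Python needs none.
def countsB (max_digit : Int) (v : Int) : List Nat :=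
  if v = 1 then [0]
  else (PySem.List.pyRange 2 (max_digit + 1) 1).foldl
    (fun s d =>
      if PySem.Int.mod v d = 0 then
        PySem.Set.update s
          ((if h : (PySem.Int.floordiv v d).toNat < v.toNat then
              countsB max_digit (PySem.Int.floordiv v d) else []).map (· + 1))
      else s) []
termination_by v.toNat
decreasing_by exact h

def can_factor_py_alt (value : Int) (k : Int) (max_digit : Int) : Bool :=
  if k ≤ 0 then decide (k = 0 ∧ value = 1)
  else if value ≤ 0 ∨ max_digit < 1 then false
  else (countsB max_digit value).any (fun m => decide ((m : Int) ≤ k))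

-- ===== PRECONDITION & SPEC =====
-- Pre_ excludes inputs on which A does not sensibly return: value ≤ 0 with k ≥ 1 and
-- max_digit ≥ 1 (A explores the full max_digit^k branching tree — practically divergent for
-- moderate k and a RecursionError past the interpreter depth limit); k < 0 with max_digit = 0
-- (A raises ZeroDivisionError); and the remaining k ≤ 0 corners (value ≤ 1-ish) where A either
-- recurses unboundedly through the float power max_digit**k or returns an accident of that
-- float comparison on the empty/identity product (B returns the natural empty-product answer).
def Pre_can_factor_py (value : Int) (k : Int) (max_digit : Int) : Prop :=
  (1 ≤ value ∧ 1 ≤ k) ∨ (value ≤ 0 ∧ 1 ≤ k ∧ max_digit ≤ 0) ∨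
    (k = 0 ∧ (2 ≤ value ∨ (value ≤ 0 ∧ max_digit ≤ 0))) ∨
    (k < 0 ∧ (max_digit < 0 ∨ (1 ≤ max_digit ∧ 1 ≤ value ∧ (2 ≤ max_digit ∨ 2 ≤ value))))
instance (value : Int) (k : Int) (max_digit : Int) : Decidable (Pre_can_factor_py value k max_digit) := by unfold Pre_can_factor_py; infer_instance

def pvWitness_can_factor_py : Int × Int × Int := (6, 3, 9)

def Spec_can_factor_py (value : Int) (k : Int) (max_digit : Int) (out : Bool) : Prop := out = can_factor_py_alt value k max_digit
instance (value : Int) (k : Int) (max_digit : Int) (out : Bool) : Decidable (Spec_can_factor_py value k max_digit out) := by unfold Spec_can_factor_py; infer_instance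

-- ===== CLAIM (what is proved, stated in full; the proofs are below) =====
def Claim_equal_can_factor_py : Prop := ∀ (value : Int) (k : Int) (max_digit : Int), Dom_can_factor_py value k max_digit → Pre_can_factor_py value k max_digit → Spec_can_factor_py value k max_digit (can_factor_py value k max_digit)

-- ===== LEMMAS AND PROOFS =====

-- `HasFact lo v md n`: v is the product of exactly n integers taken from [lo, md].
def HasFact (lo v md : Int) (n : Nat) : Prop :=
  ∃ l : List Int, l.length = n ∧ (∀ d ∈ l, lo ≤ d ∧ d ≤ md) ∧ l.prod = v

theorem prod_one_le : ∀ {l : List Int}, (∀ d ∈ l, 1 ≤ d) → 1 ≤ l.prod := by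
  intro l
  induction l with
  | nil => intro _; simp
  | cons a t ih =>
    intro h
    have ha := h a (by simp)
    have ht := ih (fun d hd => h d (by simp [hd]))
    simp only [List.prod_cons]
    nlinarith

theorem prod_pos_le {md : Int} : ∀ {l : List Int}, (∀ d ∈ l, 1 ≤ d ∧ d ≤ md) →
    1 ≤ l.prod ∧ l.prod ≤ md ^ l.length := by
  intro l
  induction l with
  | nil => intro _; simp
  | cons a t ih =>
    intro h
    obtain ⟨ha1, ha2⟩ := h a (by simp)
    obtain ⟨ht1, ht2⟩ := ih (fun d hd => h d (by simp [hd]))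
    constructor
    · simp only [List.prod_cons]
      nlinarith
    · simp only [List.prod_cons, List.length_cons, pow_succ]
      calc a * t.prod ≤ md * t.prod := by
            exact mul_le_mul_of_nonneg_right ha2 (by omega)
        _ ≤ md * md ^ t.length := by
            exact mul_le_mul_of_nonneg_left ht2 (by omega)
        _ = md ^ t.length * md := by ring

theorem prod_two_pow_le {md : Int} : ∀ {l : List Int}, (∀ d ∈ l, 2 ≤ d ∧ d ≤ md) →
    2 ^ l.length ≤ l.prod := by
  intro l
  induction l with
  | nil => intro _; simp
  | cons a t ih =>
    intro h
    obtain ⟨ha1, _⟩ := h a (by simp)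
    have ht := ih (fun d hd => h d (by simp [hd]))
    simp only [List.prod_cons, List.length_cons, pow_succ]
    have htprod : (1:Int) ≤ t.prod :=
      prod_one_le (fun d hd => by have := (h d (by simp [hd])).1; omega)
    calc (2:Int) ^ t.length * 2 ≤ t.prod * a := by
          exact mul_le_mul ht ha1 (by omega) (by omega)
      _ = a * t.prod := by ring

theorem hasFact_one_iff {lo v md : Int} : HasFact lo v md 1 ↔ lo ≤ v ∧ v ≤ md := by
  constructor
  · rintro ⟨l, hlen, hb, hp⟩
    rw [List.length_eq_one_iff] at hlen
    obtain ⟨a, rfl⟩ := hlen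
    simp only [List.prod_cons, List.prod_nil, mul_one] at hp
    subst hp
    exact hb _ (by simp)
  · intro h
    exact ⟨[v], rfl, by simpa using h, by simp⟩

theorem hasFact_succ_iff {lo v md : Int} {n : Nat} (hlo : 1 ≤ lo) :
    HasFact lo v md (n + 1) ↔
      ∃ d : Int, (lo ≤ d ∧ d ≤ md) ∧ d ∣ v ∧ HasFact lo (v / d) md n := by
  constructor
  · rintro ⟨l, hlen, hb, hp⟩
    match l, hlen with
    | d :: t, hlen =>
      have hd := hb d (by simp)
      have hdvd : d ∣ v := ⟨t.prod, by rw [← hp, List.prod_cons]⟩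
      have hdne : d ≠ 0 := by omega
      refine ⟨d, hd, hdvd, t, by simpa using hlen, fun x hx => hb x (by simp [hx]), ?_⟩
      rw [← hp, List.prod_cons, Int.mul_ediv_cancel_left _ hdne]
  · rintro ⟨d, hd, hdvd, l, hlen, hb, hp⟩
    refine ⟨d :: l, by simp [hlen], ?_, ?_⟩
    · intro x hx
      rcases List.mem_cons.1 hx with rfl | hx
      · exact hd
      · exact hb x hx
    · rw [List.prod_cons, hp, mul_comm]
      exact Int.ediv_mul_cancel hdvd

theorem quot_bounds {v d : Int} (hd : 1 ≤ d) (hv : 1 ≤ v) (hdvd : d ∣ v) :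
    1 ≤ v / d ∧ (2 ≤ d → v / d < v) := by
  obtain ⟨c, rfl⟩ := hdvd
  rw [Int.mul_ediv_cancel_left _ (by omega)]
  have hc : 1 ≤ c := by nlinarith
  exact ⟨hc, fun h2 => by nlinarith⟩

theorem canA_iff (md : Int) : ∀ (n : Nat) (k v : Int), k.toNat = n → 1 ≤ k → 1 ≤ v →
    (can_factor_py v k md = true ↔ HasFact 1 v md k.toNat) := by
  intro n
  induction n with
  | zero => intro k v hkn hk _; omega
  | succ n ih =>
    intro k v hkn hk hv
    by_cases hk1 : k = 1
    · subst hk1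
      rw [can_factor_py, if_pos rfl]
      rw [show ((1:Int).toNat) = 1 from rfl, hasFact_one_iff]
      simp
    · have hk2 : 2 ≤ k := by omega
      rw [can_factor_py, if_neg hk1]
      by_cases hgt : pyPowGtA v md k = true
      · rw [if_pos hgt]
        have hlt : md ^ k.toNat < v := by
          unfold pyPowGtA at hgt
          rw [if_pos (by omega : (0:Int) ≤ k)] at hgt
          exact of_decide_eq_true hgt
        constructor
        · intro h; simp at h
        · rintro ⟨l, hlen, hb, hp⟩
          have h2 := prod_pos_le (md := md) hb
          rw [hlen, hp] at h2
          omega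
      · rw [if_neg hgt, if_neg (by omega : ¬ k ≤ 0)]
        rw [List.any_eq_true]
        rw [show k.toNat = n + 1 from hkn, hasFact_succ_iff le_rfl]
        constructor
        · rintro ⟨d, hdmem, hdp⟩
          rw [PySem.List.mem_pyRange_neg_one] at hdmem
          obtain ⟨hd0, hdmd⟩ := hdmem
          rw [Bool.and_eq_true, decide_eq_true_eq] at hdp
          obtain ⟨hmod, hrec⟩ := hdp
          rw [PySem.Int.mod_eq_emod_of_pos hd0] at hmod
          have hdvd : d ∣ v := Int.dvd_of_emod_eq_zero hmod
          have hq1 : 1 ≤ v / d := (quot_bounds (by omega) hv hdvd).1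
          rw [PySem.Int.floordiv_eq_ediv_of_pos hd0] at hrec
          have := (ih (k - 1) (v / d) (by omega) (by omega) hq1).1 hrec
          rw [show (k - 1).toNat = n from by omega] at this
          exact ⟨d, ⟨by omega, hdmd⟩, hdvd, this⟩
        · rintro ⟨d, ⟨hd1, hdmd⟩, hdvd, hfact⟩
          refine ⟨d, ?_, ?_⟩
          · rw [PySem.List.mem_pyRange_neg_one]; omega
          · have hq1 : 1 ≤ v / d := (quot_bounds (by omega) hv hdvd).1
            rw [Bool.and_eq_true, decide_eq_true_eq]
            constructor
            · rw [PySem.Int.mod_eq_emod_of_pos (by omega)]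
              exact Int.emod_eq_zero_of_dvd hdvd
            · rw [PySem.Int.floordiv_eq_ediv_of_pos (by omega)]
              rw [ih (k - 1) (v / d) (by omega) (by omega) hq1]
              rw [show (k - 1).toNat = n from by omega]
              exact hfact

-- membership in B's set-building fold
theorem mem_foldl_set (g : Int → List Nat) (P : Int → Prop) [DecidablePred P] :
    ∀ (l : List Int) (s : List Nat) (m : Nat),
      (m ∈ l.foldl (fun s d => if P d then PySem.Set.update s (g d) else s) s) ↔
        m ∈ s ∨ ∃ d ∈ l, P d ∧ m ∈ g d := by
  intro l
  induction l with
  | nil => intro s m; simp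
  | cons a t ih =>
    intro s m
    rw [List.foldl_cons, ih]
    by_cases h : P a
    · rw [if_pos h, PySem.Set.mem_update]
      constructor
      · rintro (⟨hs | hg⟩ | hd)
        · exact Or.inl hs
        · exact Or.inr ⟨a, by simp, h, hg⟩
        · obtain ⟨d, hd, hpd, hgd⟩ := hd
          exact Or.inr ⟨d, by simp [hd], hpd, hgd⟩
      · rintro (hs | ⟨d, hd, hpd, hgd⟩)
        · exact Or.inl (Or.inl hs)
        · rcases List.mem_cons.1 hd with rfl | hd
          · exact Or.inl (Or.inr hgd)
          · exact Or.inr ⟨d, hd, hpd, hgd⟩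
    · rw [if_neg h]
      constructor
      · rintro (hs | ⟨d, hd, hpd, hgd⟩)
        · exact Or.inl hs
        · exact Or.inr ⟨d, by simp [hd], hpd, hgd⟩
      · rintro (hs | ⟨d, hd, hpd, hgd⟩)
        · exact Or.inl hs
        · rcases List.mem_cons.1 hd with rfl | hd
          · exact absurd hpd h
          · exact Or.inr ⟨d, hd, hpd, hgd⟩

theorem countsB_iff (md : Int) : ∀ (n : Nat) (v : Int), v.toNat = n → 1 ≤ v → ∀ m : Nat,
    (m ∈ countsB md v ↔ HasFact 2 v md m) := by
  intro n
  induction n using Nat.strong_induction_on with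
  | _ n ih =>
    intro v hvn hv m
    by_cases hv1 : v = 1
    · subst hv1
      rw [countsB, if_pos rfl]
      constructor
      · intro h
        simp at h
        subst h
        exact ⟨[], rfl, by simp, by simp⟩
      · rintro ⟨l, hlen, hb, hp⟩
        have h2 := prod_two_pow_le (md := md) hb
        have hm : l.length = 0 := by
          by_contra hne
          have h1 : 1 ≤ l.length := Nat.one_le_iff_ne_zero.2 hne
          have h3 : (2:Int) ≤ 2 ^ l.length := by
            calc (2:Int) = 2 ^ 1 := (pow_one 2).symm
              _ ≤ 2 ^ l.length := pow_le_pow_right₀ (by omega) h1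
          omega
        simp only [hm] at hlen
        simp [← hlen]
    · have hv2 : 2 ≤ v := by omega
      rw [countsB, if_neg hv1]
      rw [mem_foldl_set (fun d => ((if h : (PySem.Int.floordiv v d).toNat < v.toNat then
              countsB md (PySem.Int.floordiv v d) else []).map (· + 1)))
            (fun d => PySem.Int.mod v d = 0)]
      constructor
      · rintro (h | ⟨d, hdmem, hmod, hmap⟩)
        · simp at h
        · rw [PySem.List.mem_pyRange_one] at hdmem
          obtain ⟨hd2, hdlt⟩ := hdmem
          rw [PySem.Int.mod_eq_emod_of_pos (by omega)] at hmod
          have hdvd : d ∣ v := Int.dvd_of_emod_eq_zero hmod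
          obtain ⟨hq1, hqlt'⟩ := quot_bounds (by omega) (by omega) hdvd
          have hqlt : v / d < v := hqlt' hd2
          rw [PySem.Int.floordiv_eq_ediv_of_pos (by omega)] at hmap
          rw [dif_pos (by omega)] at hmap
          rw [List.mem_map] at hmap
          obtain ⟨m', hm', rfl⟩ := hmap
          have := (ih (v / d).toNat (by omega) (v / d) rfl hq1 m').1 hm'
          rw [hasFact_succ_iff (by omega)]
          exact ⟨d, ⟨hd2, by omega⟩, hdvd, this⟩
      · intro hfact
        have hm1 : 1 ≤ m := by
          rcases Nat.eq_zero_or_pos m with rfl | h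
          · obtain ⟨l, hlen, _, hp⟩ := hfact
            rw [List.length_eq_zero_iff] at hlen
            subst hlen
            simp at hp
            omega
          · exact h
        obtain ⟨m', rfl⟩ : ∃ m', m = m' + 1 := ⟨m - 1, by omega⟩
        rw [hasFact_succ_iff (by omega)] at hfact
        obtain ⟨d, ⟨hd2, hdmd⟩, hdvd, hfact'⟩ := hfact
        obtain ⟨hq1, hqlt'⟩ := quot_bounds (by omega) (by omega) hdvd
        have hqlt : v / d < v := hqlt' hd2
        refine Or.inr ⟨d, ?_, ?_, ?_⟩
        · rw [PySem.List.mem_pyRange_one]; omega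
        · rw [PySem.Int.mod_eq_emod_of_pos (by omega)]
          exact Int.emod_eq_zero_of_dvd hdvd
        · rw [PySem.Int.floordiv_eq_ediv_of_pos (by omega)]
          rw [dif_pos (by omega)]
          rw [List.mem_map]
          exact ⟨m', (ih (v / d).toNat (by omega) (v / d) rfl hq1 m').2 hfact', rfl⟩

-- stripping the 1s / padding with 1s
theorem filter_prod_eq {l : List Int} (h : ∀ d ∈ l, 1 ≤ d) :
    (l.filter (fun d => decide (2 ≤ d))).prod = l.prod := by
  induction l with
  | nil => rfl
  | cons a t ih =>
    have ha := h a (by simp)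
    have ht := ih (fun d hd => h d (by simp [hd]))
    by_cases h2 : 2 ≤ a
    · rw [List.filter_cons_of_pos (by simpa using h2), List.prod_cons, List.prod_cons, ht]
    · have ha1 : a = 1 := by omega
      rw [List.filter_cons_of_neg (by simpa using h2), List.prod_cons, ht, ha1, one_mul]

theorem pad_iff {v md : Int} (hmd : 1 ≤ md) (n : Nat) :
    HasFact 1 v md n ↔ ∃ m ≤ n, HasFact 2 v md m := by
  constructor
  · rintro ⟨l, hlen, hb, hp⟩
    refine ⟨(l.filter (fun d => decide (2 ≤ d))).length, by
      calc _ ≤ l.length := List.length_filter_le _ _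
        _ = n := hlen, ?_⟩
    refine ⟨l.filter (fun d => decide (2 ≤ d)), rfl, ?_, ?_⟩
    · intro d hd
      rw [List.mem_filter, decide_eq_true_eq] at hd
      exact ⟨hd.2, (hb d hd.1).2⟩
    · rw [filter_prod_eq (fun d hd => (hb d hd).1), hp]
  · rintro ⟨m, hmn, l, hlen, hb, hp⟩
    refine ⟨l ++ List.replicate (n - m) 1, by simp [hlen]; omega, ?_, ?_⟩
    · intro d hd
      rcases List.mem_append.1 hd with hd | hd
      · have := hb d hd; omega
      · rw [List.eq_of_mem_replicate hd]; omega
    · rw [List.prod_append, List.prod_replicate, one_pow, mul_one, hp]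

theorem no_fact_of_md_lt_one {v md : Int} (hmd : md < 1) {n : Nat} (hn : 1 ≤ n) :
    ¬ HasFact 1 v md n := by
  rintro ⟨l, hlen, hb, _⟩
  cases l with
  | nil => simp at hlen; omega
  | cons d t =>
    have := hb d (by simp)
    omega

theorem canA_nonpos (md : Int) : ∀ (n : Nat) (k v : Int), k.toNat = n → 1 ≤ k → v ≤ 0 →
    can_factor_py v k md = false := by
  intro n
  induction n with
  | zero => intro k v hkn hk _; omega
  | succ n ih =>
    intro k v hkn hk hv
    rw [can_factor_py]
    by_cases hk1 : k = 1
    · rw [if_pos hk1]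
      simp only [decide_eq_false_iff_not]
      omega
    · rw [if_neg hk1]
      by_cases hgt : pyPowGtA v md k = true
      · rw [if_pos hgt]
      · rw [if_neg hgt, if_neg (by omega : ¬ k ≤ 0)]
        rw [List.any_eq_false]
        intro d hd
        rw [PySem.List.mem_pyRange_neg_one] at hd
        rw [Bool.and_eq_true, decide_eq_true_eq]
        rintro ⟨hmod, hrec⟩
        have hq : PySem.Int.floordiv v d ≤ 0 := by
          rw [PySem.Int.floordiv_eq_ediv_of_pos hd.1]
          calc v / d ≤ 0 / d := Int.ediv_le_ediv hd.1 hv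
            _ = 0 := Int.zero_ediv d
        rw [ih (k - 1) _ (by omega) (by omega) hq] at hrec
        exact Bool.false_ne_true hrec

-- ===== VERDICT (by name: the statement is the Claim_ definition above) =====
theorem can_factor_py_spec : Claim_equal_can_factor_py := by
  intro value k max_digit _ hpre
  unfold Spec_can_factor_py
  by_cases hk : 1 ≤ k
  · by_cases hv : 1 ≤ value
    · -- main region: 1 ≤ value, 1 ≤ k
      rw [can_factor_py_alt, if_neg (by omega : ¬ k ≤ 0)]
      by_cases hdeg : value ≤ 0 ∨ max_digit < 1
      · rw [if_pos hdeg]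
        have hmd1 : max_digit < 1 := by omega
        have hA := canA_iff max_digit k.toNat k value rfl hk hv
        cases h : can_factor_py value k max_digit with
        | false => rfl
        | true => exact absurd (hA.1 h) (no_fact_of_md_lt_one hmd1 (by omega))
      · rw [if_neg hdeg]
        have hmd1 : 1 ≤ max_digit := by omega
        rw [Bool.eq_iff_iff]
        rw [canA_iff max_digit k.toNat k value rfl hk hv]
        rw [pad_iff hmd1]
        rw [List.any_eq_true]
        constructor
        · rintro ⟨m, hmn, hfact⟩
          exact ⟨m, (countsB_iff max_digit value.toNat value rfl hv m).2 hfact,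
            by rw [decide_eq_true_eq]; omega⟩
        · rintro ⟨m, hmem, hle⟩
          rw [decide_eq_true_eq] at hle
          exact ⟨m, by omega, (countsB_iff max_digit value.toNat value rfl hv m).1 hmem⟩
    · -- 1 ≤ k, value ≤ 0: both sides are false
      rw [can_factor_py_alt, if_neg (by omega : ¬ k ≤ 0), if_pos (Or.inl (by omega))]
      exact canA_nonpos max_digit k.toNat k value rfl hk (by omega)
  · -- k ≤ 0: A reaches no recursive call inside Pre_ and returns False; so does B
    have hne : ¬ (k = 0 ∧ value = 1) := by
      rcases hpre with h | h | h | h <;> omega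
    have hA : can_factor_py value k max_digit = false := by
      rw [can_factor_py, if_neg (by omega : ¬ k = 1)]
      by_cases hgt : pyPowGtA value max_digit k = true
      · rw [if_pos hgt]
      · rw [if_neg hgt, if_pos (by omega : k ≤ 0)]
    rw [hA, can_factor_py_alt, if_pos (by omega : k ≤ 0)]
    simp [hne]
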